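-- pv_equiv track=rewrite | github.com/jporeda/wordle_solver | wordle_guesser.py | find_best_option_in_next_guess
-- ===== SOURCE A (Python) =====
-- def find_best_option_in_next_guess(guess_list):
--     for word in guess_list:
--         if word[-2:] == "er":
--             return word
--     for word in guess_list:
--         if "ud" in list(word):
--             return word
--     for word in guess_list:
--         if "u" in list(word):
--             return word
--     for word in guess_list:
--         if "un" in list(word):
--             return word
--     for word in guess_list:
--         if "a" in word:
--             return word
--     for word in guess_list:
--         if "un" in list(word):
--             return word
--     for word in guess_list:
--         if "ou" in list(word):
--             return word
--     for word in guess_list: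
--         if "r" in list(word):
--             return word
--     for word in guess_list:
--         if "a" in list(word):
--             return word
--     for word in guess_list:
--         if "y" in list(word):
--             return word
--
--     return guess_list[0]
-- ===== SOURCE B (Python) =====
-- def find_best_option_in_next_guess(guess_list):
--     er = u = a = r = y = None
--     for word in guess_list:
--         if er is None and word[-2:] == "er":
--             er = word
--         if u is None and "u" in word:
--             u = word
--         if a is None and "a" in word:
--             a = word
--         if r is None and "r" in word:
--             r = word
--         if y is None and "y" in word:
--             y = word
--     for candidate in (er, u, a, r, y):
--         if candidate is not None:
--             return candidate
--     return guess_list[0]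
-- ===== Notes on version B (the rewrite author's own statement) =====
-- stated objective: faster
-- what changed: B replaces A's ten sequential full scans of guess_list (several of which are dead: 'ud'/'un'/'ou' can never be elements of list(word)) by a single pass recording the first word of each live category, then returning by priority.
-- outside the precondition, e.g. on find_best_option_in_next_guess([]): A raises IndexError, B raises IndexError
import Mathlib
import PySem

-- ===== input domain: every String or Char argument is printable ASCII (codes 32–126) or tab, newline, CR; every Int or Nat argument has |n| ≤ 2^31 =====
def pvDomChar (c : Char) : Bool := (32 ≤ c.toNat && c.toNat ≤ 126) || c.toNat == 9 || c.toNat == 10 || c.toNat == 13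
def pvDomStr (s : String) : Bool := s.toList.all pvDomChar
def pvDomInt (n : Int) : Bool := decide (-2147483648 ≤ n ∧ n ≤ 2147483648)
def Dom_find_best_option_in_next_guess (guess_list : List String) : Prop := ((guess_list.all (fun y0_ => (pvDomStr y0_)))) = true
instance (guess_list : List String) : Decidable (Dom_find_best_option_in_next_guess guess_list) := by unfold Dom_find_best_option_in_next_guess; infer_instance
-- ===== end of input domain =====

-- B replaces A's ten sequential scans of guess_list by ONE pass that records the first
-- word of each (live) category, then returns by priority; return-value equivalence only.

-- ===== PORT A =====
-- word[-2:] == "er"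
def pvHasEr (w : String) : Bool := PySem.Str.slice w (some (-2)) none == "er"
-- t in list(word): Python list membership, each element a 1-character string
def pvInList (t : String) (w : String) : Bool := (w.toList.map (fun c => String.ofList [c])).contains t

def find_best_option_in_next_guess (guess_list : List String) : String :=
  match guess_list.find? pvHasEr with
  | some w => w
  | none =>
  match guess_list.find? (pvInList "ud") with
  | some w => w
  | none =>
  match guess_list.find? (pvInList "u") with
  | some w => w
  | none =>
  match guess_list.find? (pvInList "un") with
  | some w => w
  | none =>
  match guess_list.find? (fun w => PySem.Str.isIn "a" w) with
  | some w => w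
  | none =>
  match guess_list.find? (pvInList "un") with
  | some w => w
  | none =>
  match guess_list.find? (pvInList "ou") with
  | some w => w
  | none =>
  match guess_list.find? (pvInList "r") with
  | some w => w
  | none =>
  match guess_list.find? (pvInList "a") with
  | some w => w
  | none =>
  match guess_list.find? (pvInList "y") with
  | some w => w
  | none => PySem.List.pyGetD guess_list 0 ""

-- ===== PORT B =====
-- 'x = word' guarded by 'x is None'
def pvUpd (cur : Option String) (b : Bool) (w : String) : Option String :=
  match cur with
  | some v => some v
  | none => if b then some w else none

def pvStep (s : Option String × Option String × Option String × Option String × Option String)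
    (w : String) : Option String × Option String × Option String × Option String × Option String :=
  (pvUpd s.1 (pvHasEr w) w,
   pvUpd s.2.1 (PySem.Str.isIn "u" w) w,
   pvUpd s.2.2.1 (PySem.Str.isIn "a" w) w,
   pvUpd s.2.2.2.1 (PySem.Str.isIn "r" w) w,
   pvUpd s.2.2.2.2 (PySem.Str.isIn "y" w) w)

def find_best_option_in_next_guess_alt (guess_list : List String) : String :=
  let s := guess_list.foldl pvStep (none, none, none, none, none)
  match s.1 with
  | some w => w
  | none =>
  match s.2.1 with
  | some w => w
  | none =>
  match s.2.2.1 with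
  | some w => w
  | none =>
  match s.2.2.2.1 with
  | some w => w
  | none =>
  match s.2.2.2.2 with
  | some w => w
  | none => PySem.List.pyGetD guess_list 0 ""

-- ===== PRECONDITION & SPEC =====
-- Pre_ excludes only the empty list, on which A raises IndexError at guess_list[0].
def Pre_find_best_option_in_next_guess (guess_list : List String) : Prop := guess_list ≠ []
instance (guess_list : List String) : Decidable (Pre_find_best_option_in_next_guess guess_list) := by unfold Pre_find_best_option_in_next_guess; infer_instance
def pvWitness_find_best_option_in_next_guess : List String := ["xz"]

def Spec_find_best_option_in_next_guess (guess_list : List String) (out : String) : Prop := out = find_best_option_in_next_guess_alt guess_list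
instance (guess_list : List String) (out : String) : Decidable (Spec_find_best_option_in_next_guess guess_list out) := by unfold Spec_find_best_option_in_next_guess; infer_instance

-- ===== CLAIM (what is proved, stated in full; the proofs are below) =====
def Claim_equal_find_best_option_in_next_guess : Prop := ∀ (guess_list : List String), Dom_find_best_option_in_next_guess guess_list → Pre_find_best_option_in_next_guess guess_list → Spec_find_best_option_in_next_guess guess_list (find_best_option_in_next_guess guess_list)

-- ===== LEMMAS AND PROOFS =====

-- a 2-character string is never an element of list(word)
lemma pvInList_two (c d : Char) (w : String) : pvInList (String.ofList [c, d]) w = false := by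
  simp [pvInList]
  intro x _ h
  have := congrArg String.toList h
  simp at this

-- membership of a 1-character string in list(word) is substring membership
lemma pvInList_single (c : Char) (w : String) :
    pvInList (String.ofList [c]) w = PySem.Str.isIn (String.ofList [c]) w := by
  rw [Bool.eq_iff_iff, pvInList, PySem.Str.isIn_iff_infix, String.toList_ofList,
    List.singleton_infix_iff]
  constructor
  · intro h
    simp at h
    obtain ⟨x, hx, he⟩ := h
    have := congrArg String.toList he
    simp at this
    subst this
    exact hx
  · intro h
    simp
    exact ⟨c, h, rfl⟩

lemma pvFoldSpec (gl : List String) :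
    ∀ s : Option String × Option String × Option String × Option String × Option String,
      gl.foldl pvStep s =
        (s.1.or (gl.find? pvHasEr),
         s.2.1.or (gl.find? (fun w => PySem.Str.isIn "u" w)),
         s.2.2.1.or (gl.find? (fun w => PySem.Str.isIn "a" w)),
         s.2.2.2.1.or (gl.find? (fun w => PySem.Str.isIn "r" w)),
         s.2.2.2.2.or (gl.find? (fun w => PySem.Str.isIn "y" w))) := by
  induction gl with
  | nil => intro s; simp
  | cons w gl ih =>
    intro s
    have hupd : ∀ (c : Option String) (p : String → Bool),
        (pvUpd c (p w) w).or (gl.find? p) = c.or ((w :: gl).find? p) := by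
      intro c p
      cases c with
      | some v => simp [pvUpd]
      | none => cases hb : p w <;> simp [pvUpd, hb, Option.or]
    show gl.foldl pvStep (pvStep s w) = _
    rw [ih]
    simp only [pvStep]
    exact Prod.ext (hupd _ _) (Prod.ext (hupd _ _) (Prod.ext (hupd _ _) (Prod.ext (hupd _ _) (hupd _ _))))

-- ===== VERDICT (by name: the statement is the Claim_ definition above) =====
theorem find_best_option_in_next_guess_spec : Claim_equal_find_best_option_in_next_guess := by
  intro gl _ hpre
  unfold Spec_find_best_option_in_next_guess
  have hdead : ∀ (c d : Char), gl.find? (pvInList (String.ofList [c, d])) = none := by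
    intro c d
    exact List.find?_eq_none.mpr (fun x _ => by rw [pvInList_two]; simp)
  have hchar : ∀ (c : Char), gl.find? (pvInList (String.ofList [c])) = gl.find? (fun w => PySem.Str.isIn (String.ofList [c]) w) := by
    intro c
    congr 1
    funext w
    exact pvInList_single c w
  unfold find_best_option_in_next_guess find_best_option_in_next_guess_alt
  rw [pvFoldSpec]
  have hud : ("ud" : String) = String.ofList ['u', 'd'] := rfl
  have hun : ("un" : String) = String.ofList ['u', 'n'] := rfl
  have hou : ("ou" : String) = String.ofList ['o', 'u'] := rfl
  rw [hud, hun, hou, hdead, hdead, hdead,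
     show ("u" : String) = String.ofList ['u'] from rfl,
     show ("r" : String) = String.ofList ['r'] from rfl,
     show ("a" : String) = String.ofList ['a'] from rfl,
     show ("y" : String) = String.ofList ['y'] from rfl,
     hchar, hchar, hchar, hchar]
  cases h1 : gl.find? pvHasEr <;>
    cases h2 : gl.find? (fun w => PySem.Str.isIn (String.ofList ['u']) w) <;>
    cases h3 : gl.find? (fun w => PySem.Str.isIn (String.ofList ['a']) w) <;>
    cases h4 : gl.find? (fun w => PySem.Str.isIn (String.ofList ['r']) w) <;>
    cases h5 : gl.find? (fun w => PySem.Str.isIn (String.ofList ['y']) w) <;>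
    simp [Option.or]
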